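-- pv_equiv track=rewrite | github.com/SubhPB/leet-code | src/app/2025/contests/465/3670.py | maxProduct
-- ===== SOURCE A (Python) =====
-- from typing import List
--
-- def maxProduct(nums: List[int]) -> int:
--     mxm = max(nums)
--     mxbl = mxm.bit_length(); mxb = (1<<mxbl)-1
--     dp = [0]*(1<<mxbl)
--
--     for num in nums: dp[num]=num
--     for i in range(mxbl):
--         for num in range(mxb+1):
--             if num & (1<<i): dp[num]=max(dp[num],dp[num^(1<<i)])
--     return max([num*dp[mxb^num] for num in nums])
-- ===== SOURCE B (Python) =====
-- from typing import List
--
-- def maxProduct(nums: List[int]) -> int: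
--     # Direct pairwise scan: best product of two (not necessarily distinct)
--     # entries with disjoint bits; 0 when no disjoint pair exists.
--     ans = 0
--     for x in nums:
--         for y in nums:
--             if x & y == 0 and x * y > ans:
--                 ans = x * y
--     return ans
-- ===== Notes on version B (the rewrite author's own statement) =====
-- stated objective: simpler
-- what changed: Replaced the subset-sum (SOS) DP over a 2^bitlength table by a direct O(n^2) pairwise scan keeping the running maximum product of bit-disjoint pairs.
-- outside the precondition, e.g. on maxProduct([3, -4]): A returns -12, B returns 0; on maxProduct([1, -3]): A raises IndexError, B returns 0
import Mathlib
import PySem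

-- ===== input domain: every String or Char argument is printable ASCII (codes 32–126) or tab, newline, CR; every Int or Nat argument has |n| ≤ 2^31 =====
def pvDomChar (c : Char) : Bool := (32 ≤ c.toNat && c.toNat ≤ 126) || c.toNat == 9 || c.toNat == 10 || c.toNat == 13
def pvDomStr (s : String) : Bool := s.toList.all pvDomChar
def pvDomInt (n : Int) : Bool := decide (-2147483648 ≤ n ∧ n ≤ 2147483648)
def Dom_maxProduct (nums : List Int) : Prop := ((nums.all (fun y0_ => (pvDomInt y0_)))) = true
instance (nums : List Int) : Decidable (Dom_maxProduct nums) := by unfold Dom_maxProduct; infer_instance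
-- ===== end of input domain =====

-- B replaces A's subset-sum DP over a 2^bitlength table by a plain O(n^2) pairwise
-- max-product scan (objective: simpler; not claimed faster).

-- ===== PORT A =====
def maxProduct (nums : List Int) : Int :=
  match PySem.List.max? nums (fun x => x) with
  | none => 0  -- Python: max([]) raises ValueError; excluded by Pre_
  | some mxm =>
    let mxbl : Nat := PySem.Int.bitLength mxm
    let mxb : Int := ((1:Int) <<< mxbl) - 1
    let dp0 : List Int := List.replicate ((1:Nat) <<< mxbl) 0
    let dp1 : List Int := nums.foldl (fun dp num => PySem.List.pySetD dp num num) dp0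
    let dp2 : List Int :=
      (PySem.List.pyRange 0 (mxbl : Int) 1).foldl (fun dp i =>
        (PySem.List.pyRange 0 (mxb + 1) 1).foldl (fun dp num =>
          if PySem.Int.band num ((1:Int) <<< i.toNat) ≠ 0 then
            PySem.List.pySetD dp num
              (max (PySem.List.pyGetD dp num 0)
                   (PySem.List.pyGetD dp (PySem.Int.bxor num ((1:Int) <<< i.toNat)) 0))
          else dp) dp) dp1
    match PySem.List.max?
        (nums.map (fun num => num * PySem.List.pyGetD dp2 (PySem.Int.bxor mxb num) 0))
        (fun x => x) with
    | none => 0  -- unreachable under Pre_ (nums ≠ [])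
    | some r => r

-- ===== PORT B =====
def maxProduct_alt (nums : List Int) : Int :=
  nums.foldl (fun ans x =>
    nums.foldl (fun ans y =>
      if PySem.Int.band x y = 0 ∧ x * y > ans then x * y else ans) ans) 0

-- ===== PRECONDITION & SPEC =====
-- Pre_ excludes the empty list (A's max(nums) raises ValueError) and lists containing a
-- negative number, which lie outside the bitmask task's natural domain: there A either
-- raises IndexError or returns accidental values via Python's negative-index wraparound.
def Pre_maxProduct (nums : List Int) : Prop := nums ≠ [] ∧ ∀ x ∈ nums, 0 ≤ x
instance (nums : List Int) : Decidable (Pre_maxProduct nums) := by unfold Pre_maxProduct; infer_instance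
def pvWitness_maxProduct : List Int := [5, 3, 10]

def Spec_maxProduct (nums : List Int) (out : Int) : Prop := out = maxProduct_alt nums
instance (nums : List Int) (out : Int) : Decidable (Spec_maxProduct nums out) := by unfold Spec_maxProduct; infer_instance

-- ===== CLAIM (what is proved, stated in full; the proofs are below) =====
def Claim_equal_maxProduct : Prop := ∀ (nums : List Int), Dom_maxProduct nums → Pre_maxProduct nums → Spec_maxProduct nums (maxProduct nums)

-- ===== LEMMAS AND PROOFS =====

-- bounded running max over a filtered list
def bstep (p : Nat → Bool) (a : Int) (x : Nat) : Int := if p x then max a (x:Int) else a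
def bb (ns : List Nat) (p : Nat → Bool) (a : Int) : Int := ns.foldl (bstep p) a
-- "x is a submask of m agreeing with m on all bits ≥ i"
def muP (i m x : Nat) : Bool := (x &&& m == x) && (x >>> i == m >>> i)
-- dp-table model: max (or 0) over elements that are submasks of m fixed above bit i
def mu (ns : List Nat) (i m : Nat) : Int := bb ns (muP i m) 0
-- one in-place SOS update at index k for bit i
def sosStep (i : Nat) (dp : List Int) (k : Nat) : List Int :=
  if k &&& 2^i ≠ 0 then dp.set k (max (dp.getD k 0) (dp.getD (k ^^^ 2^i) 0)) else dp
-- B's loops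
def innerB (x : Int) (l : List Int) (a : Int) : Int :=
  l.foldl (fun ans y => if PySem.Int.band x y = 0 ∧ x * y > ans then x * y else ans) a
def outerB (nums l : List Int) (a : Int) : Int := l.foldl (fun ans x => innerB x nums ans) a

lemma alt_eq (nums : List Int) : maxProduct_alt nums = outerB nums nums 0 := rfl

lemma bb_cons (p : Nat → Bool) (a : Int) (y : Nat) (t : List Nat) :
    bb (y :: t) p a = bb t p (bstep p a y) := rfl

lemma le_bb (ns : List Nat) (p : Nat → Bool) (a : Int) : a ≤ bb ns p a := by
  induction ns generalizing a with
  | nil => simp [bb]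
  | cons x t ih =>
    rw [bb_cons]
    refine le_trans ?_ (ih (bstep p a x))
    simp only [bstep]; split <;> simp

lemma bb_le (ns : List Nat) (p : Nat → Bool) (a c : Int)
    (h : ∀ x ∈ ns, p x = true → (x:Int) ≤ c) (ha : a ≤ c) : bb ns p a ≤ c := by
  induction ns generalizing a with
  | nil => simpa [bb]
  | cons x t ih =>
    rw [bb_cons]
    refine ih _ (fun y hy hp => h y (by simp [hy]) hp) ?_
    simp only [bstep]; split
    · exact max_le ha (h x (by simp) (by assumption))
    · exact ha

lemma le_bb_of_mem (ns : List Nat) (p : Nat → Bool) (a : Int) (x : Nat)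
    (hx : x ∈ ns) (hp : p x = true) : (x:Int) ≤ bb ns p a := by
  induction ns generalizing a with
  | nil => simp at hx
  | cons y t ih =>
    rw [bb_cons]
    rcases List.mem_cons.mp hx with h | h
    · subst h
      refine le_trans ?_ (le_bb t p (bstep p a x))
      simp [bstep, hp]
    · exact ih (bstep p a y) h

lemma bb_cases (ns : List Nat) (p : Nat → Bool) (a : Int) :
    bb ns p a = a ∨ ∃ x ∈ ns, p x = true ∧ bb ns p a = (x:Int) := by
  induction ns generalizing a with
  | nil => left; rfl
  | cons y t ih =>
    rw [bb_cons]
    rcases ih (bstep p a y) with h | ⟨x, hx, hp, he⟩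
    · by_cases hpy : p y = true
      · by_cases hya : (y:Int) ≤ a
        · left; rw [h]; simp [bstep, hpy, max_eq_left hya]
        · right; exact ⟨y, by simp, hpy, by rw [h]; simp [bstep, hpy, max_eq_right (le_of_not_ge hya)]⟩
      · left; rw [h]; simp [bstep, hpy]
    · right; exact ⟨x, by simp [hx], hp, he⟩

lemma bb_congr (ns : List Nat) (p q : Nat → Bool) (a : Int)
    (h : ∀ x ∈ ns, p x = q x) : bb ns p a = bb ns q a := by
  induction ns generalizing a with
  | nil => rfl
  | cons y t ih =>
    rw [bb_cons, bb_cons]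
    rw [show bstep p a y = bstep q a y by simp [bstep, h y (by simp)]]
    exact ih _ (fun x hx => h x (by simp [hx]))

lemma bb_nonneg (ns : List Nat) (p : Nat → Bool) : (0:Int) ≤ bb ns p 0 := le_bb ns p 0

lemma bb_mono_pred (ns : List Nat) (p q : Nat → Bool)
    (h : ∀ x ∈ ns, p x = true → q x = true) : bb ns p 0 ≤ bb ns q 0 := by
  rcases bb_cases ns p 0 with he | ⟨x, hx, hp, he⟩
  · rw [he]; exact bb_nonneg ns q
  · rw [he]; exact le_bb_of_mem ns q 0 x hx (h x hx hp)

lemma bb_eqpred (ns : List Nat) (m : Nat) (a : Int) :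
    bb ns (fun x => x == m) a = if m ∈ ns then max a (m:Int) else a := by
  induction ns generalizing a with
  | nil => simp [bb]
  | cons y t ih =>
    rw [bb_cons, ih]
    by_cases hy : y = m
    · subst hy
      by_cases hm : y ∈ t
      · simp [bstep, List.mem_cons, hm]
      · simp [bstep, List.mem_cons, hm]
    · simp [bstep, hy, List.mem_cons, Ne.symm hy]

-- ---- bit lemmas ----
lemma land_sub_iff (x m : Nat) : x &&& m = x ↔ ∀ j, x.testBit j = true → m.testBit j = true := by
  constructor
  · intro h j hj
    have := congrArg (fun n => n.testBit j) h
    simp only [Nat.testBit_and, hj, Bool.true_and] at this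
    exact this
  · intro h
    apply Nat.eq_of_testBit_eq
    intro j
    simp only [Nat.testBit_and]
    cases hx : x.testBit j
    · simp
    · simp [h j hx]

lemma shiftRight_eq_iff (x m i : Nat) :
    x >>> i = m >>> i ↔ ∀ j, i ≤ j → x.testBit j = m.testBit j := by
  constructor
  · intro h j hij
    have := congrArg (fun n => n.testBit (j - i)) h
    simpa [Nat.testBit_shiftRight, Nat.add_sub_cancel' hij] using this
  · intro h
    apply Nat.eq_of_testBit_eq
    intro k
    simp only [Nat.testBit_shiftRight]
    exact h (i + k) (Nat.le_add_right i k)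

lemma land_eq_zero_iff (x y : Nat) :
    x &&& y = 0 ↔ ∀ j, x.testBit j = true → y.testBit j = false := by
  constructor
  · intro h j hj
    have := congrArg (fun n => n.testBit j) h
    simp only [Nat.testBit_and, hj, Bool.true_and, Nat.zero_testBit] at this
    exact this
  · intro h
    apply Nat.eq_of_testBit_eq
    intro j
    simp only [Nat.testBit_and, Nat.zero_testBit]
    cases hx : x.testBit j
    · simp
    · simp [h j hx]

lemma land_two_pow_ne (x i : Nat) : (x &&& 2^i ≠ 0) ↔ x.testBit i = true := by
  constructor
  · intro h
    by_contra hb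
    apply h
    apply Nat.eq_of_testBit_eq
    intro j
    simp only [Nat.testBit_and, Nat.testBit_two_pow, Nat.zero_testBit]
    by_cases hij : i = j
    · subst hij
      simp at hb
      simp [hb]
    · simp [hij]
  · intro h hz
    have := congrArg (fun n => n.testBit i) hz
    simp [Nat.testBit_and, h] at this

lemma testBit_high (x L j : Nat) (h : x < 2^L) (hj : L ≤ j) : x.testBit j = false := by
  apply Nat.testBit_eq_false_of_lt
  exact lt_of_lt_of_le h (Nat.pow_le_pow_right (by norm_num) hj)

-- ---- mu characterisations ----
lemma muP_true_iff (i m x : Nat) :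
    muP i m x = true ↔ (x &&& m = x ∧ x >>> i = m >>> i) := by
  simp [muP]

lemma mu_zero (ns : List Nat) (m : Nat) :
    mu ns 0 m = if m ∈ ns then (m:Int) else 0 := by
  unfold mu
  rw [bb_congr ns (muP 0 m) (fun x => x == m) 0 ?_]
  · rw [bb_eqpred]; split <;> simp
  · intro x _
    have : muP 0 m x = true ↔ (x == m) = true := by
      rw [muP_true_iff]
      simp only [Nat.shiftRight_zero, beq_iff_eq]
      constructor
      · rintro ⟨_, h2⟩; exact h2
      · rintro rfl; exact ⟨Nat.and_self x, rfl⟩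
    exact Bool.coe_iff_coe.mp this

lemma mu_succ_false (ns : List Nat) (i m : Nat) (h : m.testBit i = false) :
    mu ns (i+1) m = mu ns i m := by
  unfold mu
  apply bb_congr
  intro x _
  apply Bool.coe_iff_coe.mp
  rw [muP_true_iff, muP_true_iff]
  constructor
  · rintro ⟨h1, h2⟩
    refine ⟨h1, (shiftRight_eq_iff x m i).mpr ?_⟩
    intro j hij
    rcases Nat.lt_or_ge j (i+1) with hj | hj
    · have hji : j = i := by omega
      subst hji
      rw [h]
      have hxm := (land_sub_iff x m).mp h1
      cases hx : x.testBit j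
      · rfl
      · exact absurd (hxm j hx) (by simp [h])
    · exact (shiftRight_eq_iff x m (i+1)).mp h2 j hj
  · rintro ⟨h1, h2⟩
    refine ⟨h1, (shiftRight_eq_iff x m (i+1)).mpr ?_⟩
    intro j hij
    exact (shiftRight_eq_iff x m i).mp h2 j (by omega)

lemma testBit_xor_pow (m i j : Nat) :
    (m ^^^ 2^i).testBit j = (m.testBit j).xor (decide (i = j)) := by
  simp [Nat.testBit_xor, Nat.testBit_two_pow]

lemma mu_succ_true (ns : List Nat) (i m : Nat) (h : m.testBit i = true) :
    mu ns (i+1) m = max (mu ns i m) (mu ns i (m ^^^ 2^i)) := by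
  apply le_antisymm
  · -- every witness of the (i+1)-predicate satisfies one of the i-predicates
    apply bb_le
    · intro x hx hp
      rw [muP_true_iff] at hp
      obtain ⟨h1, h2⟩ := hp
      have hext := (shiftRight_eq_iff x m (i+1)).mp h2
      have hsub := (land_sub_iff x m).mp h1
      cases hxi : x.testBit i
      · -- x is a submask of m ^^^ 2^i agreeing above i
        refine le_trans (le_bb_of_mem ns (muP i (m ^^^ 2^i)) 0 x hx ?_) (le_max_right _ _)
        rw [muP_true_iff]
        constructor
        · apply (land_sub_iff x (m ^^^ 2^i)).mpr
          intro j hj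
          rw [testBit_xor_pow]
          have hij : i ≠ j := by rintro rfl; rw [hxi] at hj; exact Bool.false_ne_true hj
          simp [hij, hsub j hj]
        · apply (shiftRight_eq_iff x (m ^^^ 2^i) i).mpr
          intro j hij
          rw [testBit_xor_pow]
          rcases Nat.lt_or_ge j (i+1) with hj | hj
          · have : j = i := by omega
            subst this
            simp [hxi, h]
          · have hij' : i ≠ j := by omega
            simp [hij', hext j hj]
      · refine le_trans (le_bb_of_mem ns (muP i m) 0 x hx ?_) (le_max_left _ _)
        rw [muP_true_iff]
        refine ⟨h1, (shiftRight_eq_iff x m i).mpr ?_⟩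
        intro j hij
        rcases Nat.lt_or_ge j (i+1) with hj | hj
        · have : j = i := by omega
          subst this
          rw [hxi, h]
        · exact hext j hj
    · exact le_trans (bb_nonneg ns (muP i m)) (le_max_left _ _)
  · apply max_le <;> apply bb_mono_pred <;> intro x hx hp <;>
      rw [muP_true_iff] at hp ⊢ <;> obtain ⟨h1, h2⟩ := hp
    · -- submask fixed above i is also fixed above i+1
      refine ⟨h1, (shiftRight_eq_iff x m (i+1)).mpr ?_⟩
      intro j hj
      exact (shiftRight_eq_iff x m i).mp h2 j (by omega)
    · -- submask of m ^^^ 2^i fixed above i: also submask of m fixed above i+1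
      have hsub := (land_sub_iff x (m ^^^ 2^i)).mp h1
      have hext := (shiftRight_eq_iff x (m ^^^ 2^i) i).mp h2
      constructor
      · apply (land_sub_iff x m).mpr
        intro j hj
        have := hsub j hj
        rw [testBit_xor_pow] at this
        by_cases hij : i = j
        · subst hij; exact h
        · simpa [hij] using this
      · apply (shiftRight_eq_iff x m (i+1)).mpr
        intro j hj
        have hij : i ≠ j := by omega
        rw [hext j (by omega), testBit_xor_pow]
        simp [hij]

-- ---- init loop ----
lemma init_length (ns : List Nat) (dp : List Int) :
    (ns.foldl (fun d x => d.set x (x:Int)) dp).length = dp.length := by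
  induction ns generalizing dp with
  | nil => rfl
  | cons x t ih => simpa using ih (dp.set x (x:Int))

lemma set_getD (dp : List Int) (i : Nat) (v : Int) (m : Nat) (hi : i < dp.length) :
    (dp.set i v).getD m 0 = if m = i then v else dp.getD m 0 := by
  unfold List.getD
  by_cases h : m = i
  · subst h
    rw [List.getElem?_set_self (by omega)]
    simp
  · rw [List.getElem?_set_ne (fun he => h he.symm)]
    simp [h]

lemma init_getD (ns : List Nat) (dp : List Int) (m : Nat)
    (h : ∀ x ∈ ns, x < dp.length) :
    (ns.foldl (fun d x => d.set x (x:Int)) dp).getD m 0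
      = if m ∈ ns then (m:Int) else dp.getD m 0 := by
  induction ns generalizing dp with
  | nil => simp
  | cons x t ih =>
    rw [List.foldl_cons, ih (dp.set x (x:Int))
      (fun y hy => by simpa using h y (by simp [hy]))]
    rw [set_getD dp x (x:Int) m (h x (by simp))]
    by_cases hmt : m ∈ t
    · simp [hmt, List.mem_cons]
    · by_cases hmx : m = x
      · subst hmx; simp [hmt, List.mem_cons]
      · simp [hmt, hmx, List.mem_cons]

-- ---- SOS loops ----
lemma sos_inner (ns : List Nat) (L i : Nat) (hi : i < L) :
    ∀ (K : Nat) (dp : List Int), dp.length = 2^L → K ≤ 2^L →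
    (∀ m, m < 2^L → dp.getD m 0 = mu ns i m) →
    ((List.range K).foldl (sosStep i) dp).length = 2^L ∧
    ∀ m, m < 2^L → ((List.range K).foldl (sosStep i) dp).getD m 0
      = if m < K ∧ m.testBit i = true then mu ns (i+1) m else mu ns i m := by
  intro K
  induction K with
  | zero =>
    intro dp hlen _ hdp
    refine ⟨by simpa using hlen, ?_⟩
    intro m hm
    simpa using hdp m hm
  | succ K ih =>
    intro dp hlen hK hdp
    obtain ⟨ihlen, ihchar⟩ := ih dp hlen (by omega) hdp
    rw [List.range_succ, List.foldl_append, List.foldl_cons, List.foldl_nil]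
    set dpK := (List.range K).foldl (sosStep i) dp with hdpK
    cases hb : K.testBit i
    · -- bit clear: no update at K
      have hcond : ¬ (K &&& 2^i ≠ 0) := by
        rw [land_two_pow_ne]; simp [hb]
      rw [sosStep, if_neg hcond]
      refine ⟨ihlen, ?_⟩
      intro m hm
      rw [ihchar m hm]
      by_cases hmK : m = K
      · subst hmK; simp [hb]
      · have hiff : (m < K ∧ m.testBit i = true) ↔ (m < K + 1 ∧ m.testBit i = true) := by
          constructor
          · rintro ⟨h1, h2⟩; exact ⟨by omega, h2⟩
          · rintro ⟨h1, h2⟩; exact ⟨by omega, h2⟩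
        rw [if_congr hiff rfl rfl]
    · -- bit set: dp[K] := max dp[K] dp[K ^^^ 2^i]
      have hcond : (K &&& 2^i ≠ 0) := (land_two_pow_ne K i).mpr hb
      rw [sosStep, if_pos hcond]
      have hKlt : K < 2^L := by omega
      have hK' : K ^^^ 2^i < 2^L :=
        Nat.xor_lt_two_pow hKlt (Nat.pow_lt_pow_right (by norm_num) hi)
      have hvK : dpK.getD K 0 = mu ns i K := by
        rw [ihchar K hKlt]; simp
      have hvK' : dpK.getD (K ^^^ 2^i) 0 = mu ns i (K ^^^ 2^i) := by
        rw [ihchar (K ^^^ 2^i) hK']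
        have : (K ^^^ 2^i).testBit i = false := by
          rw [testBit_xor_pow]; simp [hb]
        simp [this]
      refine ⟨by simpa using ihlen, ?_⟩
      intro m hm
      rw [set_getD dpK K _ m (by omega)]
      by_cases hmK : m = K
      · subst hmK
        rw [if_pos rfl, hvK, hvK', mu_succ_true ns i m hb,
            if_pos (show m < m + 1 ∧ m.testBit i = true from ⟨by omega, hb⟩)]
      · have hiff : (m < K ∧ m.testBit i = true) ↔ (m < K + 1 ∧ m.testBit i = true) := by
          constructor
          · rintro ⟨h1, h2⟩; exact ⟨by omega, h2⟩
          · rintro ⟨h1, h2⟩; exact ⟨by omega, h2⟩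
        rw [if_neg hmK, ihchar m hm, if_congr hiff rfl rfl]

lemma sos_outer (ns : List Nat) (L : Nat) :
    ∀ (I : Nat) (dp : List Int), I ≤ L → dp.length = 2^L →
    (∀ m, m < 2^L → dp.getD m 0 = mu ns 0 m) →
    ((List.range I).foldl (fun dp i => (List.range (2^L)).foldl (sosStep i) dp) dp).length = 2^L ∧
    ∀ m, m < 2^L → ((List.range I).foldl (fun dp i => (List.range (2^L)).foldl (sosStep i) dp) dp).getD m 0 = mu ns I m := by
  intro I
  induction I with
  | zero =>
    intro dp _ hlen hdp
    refine ⟨by simpa using hlen, ?_⟩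
    intro m hm
    simpa using hdp m hm
  | succ I ih =>
    intro dp hI hlen hdp
    obtain ⟨ihlen, ihchar⟩ := ih dp (by omega) hlen hdp
    rw [List.range_succ, List.foldl_append, List.foldl_cons, List.foldl_nil]
    obtain ⟨flen, fchar⟩ := sos_inner ns L I (by omega)
      (2^L) ((List.range I).foldl (fun dp i => (List.range (2^L)).foldl (sosStep i) dp) dp)
      ihlen le_rfl ihchar
    refine ⟨flen, ?_⟩
    intro m hm
    rw [fchar m hm]
    cases hb : m.testBit I
    · rw [if_neg (by simp)]
      exact (mu_succ_false ns I m hb).symm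
    · rw [if_pos ⟨hm, rfl⟩]

-- ---- B-side lemmas ----
lemma le_innerB (x : Int) (l : List Int) (a : Int) : a ≤ innerB x l a := by
  induction l generalizing a with
  | nil => simp [innerB]
  | cons y t ih =>
    refine le_trans ?_ (ih _)
    dsimp only; split
    · exact le_of_lt (And.right (by assumption))
    · exact le_rfl

lemma le_outerB (nums l : List Int) (a : Int) : a ≤ outerB nums l a := by
  induction l generalizing a with
  | nil => simp [outerB]
  | cons x t ih => exact le_trans (le_innerB x nums a) (ih _)

lemma pair_le_innerB (x y : Int) (l : List Int) (a : Int)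
    (hy : y ∈ l) (hxy : PySem.Int.band x y = 0) : x * y ≤ innerB x l a := by
  induction l generalizing a with
  | nil => simp at hy
  | cons z t ih =>
    rcases List.mem_cons.mp hy with h | h
    · subst h
      refine le_trans ?_ (le_innerB x t _)
      dsimp only; split
      · exact le_rfl
      · rcases not_and_or.mp (by assumption) with h1 | h2
        · exact absurd hxy h1
        · exact le_of_not_gt h2
    · exact ih _ h

lemma pair_le_outerB (nums l : List Int) (x y : Int) (a : Int)
    (hx : x ∈ l) (hy : y ∈ nums) (hxy : PySem.Int.band x y = 0) :
    x * y ≤ outerB nums l a := by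
  induction l generalizing a with
  | nil => simp at hx
  | cons z t ih =>
    rcases List.mem_cons.mp hx with h | h
    · subst h
      exact le_trans (pair_le_innerB x y nums a hy hxy) (le_outerB nums t _)
    · exact ih _ h

lemma innerB_le (x : Int) (l : List Int) (a c : Int)
    (h : ∀ y ∈ l, PySem.Int.band x y = 0 → x * y ≤ c) (ha : a ≤ c) : innerB x l a ≤ c := by
  induction l generalizing a with
  | nil => simpa [innerB]
  | cons y t ih =>
    refine ih _ (fun z hz hb => h z (by simp [hz]) hb) ?_
    dsimp only; split
    · exact h y (by simp) (by tauto)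
    · exact ha

lemma outerB_le (nums l : List Int) (a c : Int)
    (h : ∀ x ∈ l, ∀ y ∈ nums, PySem.Int.band x y = 0 → x * y ≤ c) (ha : a ≤ c) :
    outerB nums l a ≤ c := by
  induction l generalizing a with
  | nil => simpa [outerB]
  | cons x t ih =>
    refine ih _ (fun z hz => h z (by simp [hz])) ?_
    exact innerB_le x nums a c (h x (by simp)) ha

-- bits of (2^L - 1) ^^^ x
lemma testBit_comp (L x j : Nat) :
    ((2^L - 1) ^^^ x).testBit j = ((decide (j < L)).xor (x.testBit j)) := by
  simp [Nat.testBit_xor, Nat.testBit_two_pow_sub_one]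

lemma comp_lt (L x : Nat) (hx : x < 2^L) : (2^L - 1) ^^^ x < 2^L :=
  Nat.xor_lt_two_pow (by omega) hx

-- the final dp row read at the complement mask is the best disjoint partner
lemma mu_comp (ns : List Nat) (L x : Nat) (hxlt : x < 2^L) (hall : ∀ y ∈ ns, y < 2^L) :
    mu ns L ((2^L - 1) ^^^ x) = bb ns (fun y => y &&& x == 0) 0 := by
  unfold mu
  apply bb_congr
  intro y hy
  have hylt := hall y hy
  apply Bool.coe_iff_coe.mp
  rw [muP_true_iff, beq_iff_eq]
  have hclt : (2^L - 1) ^^^ x < 2^L := comp_lt L x hxlt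
  constructor
  · rintro ⟨h1, _⟩
    apply (land_eq_zero_iff y x).mpr
    intro j hj
    have hjL : j < L := by
      by_contra hge
      rw [testBit_high y L j hylt (by omega)] at hj
      exact Bool.false_ne_true hj
    have := (land_sub_iff _ _).mp h1 j hj
    rw [testBit_comp] at this
    simp only [hjL, decide_true] at this
    cases hb : x.testBit j
    · rfl
    · rw [hb] at this; simp at this
  · intro h
    constructor
    · apply (land_sub_iff _ _).mpr
      intro j hj
      have hjL : j < L := by
        by_contra hge
        rw [testBit_high y L j hylt (by omega)] at hj
        exact Bool.false_ne_true hj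
      rw [testBit_comp]
      simp only [hjL, decide_true]
      rw [(land_eq_zero_iff y x).mp h j hj]
      rfl
    · apply (shiftRight_eq_iff y ((2^L - 1) ^^^ x) L).mpr
      intro j hjL
      rw [testBit_high y L j hylt hjL, testBit_high _ L j hclt hjL]

lemma int_one_shiftLeft (k : Nat) : (1:Int) <<< k = ((2^k : Nat) : Int) := by
  simp [Int.shiftLeft_eq]

lemma int_one_shiftLeft_cast (k : Nat) : (1:Int) <<< ((k : Nat) : Int) = ((2^k : Nat) : Int) :=
  Int.one_shiftLeft k

lemma int_pow_sub_one_add_one (L : Nat) : ((2^L - 1 : Nat) : Int) + 1 = ((2^L : Nat) : Int) := by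
  have : (1:Nat) ≤ 2^L := Nat.one_le_two_pow
  push_cast [this]
  ring

lemma sosStep_eq (i : Nat) :
    (fun (dp : List Int) (num : Nat) => if ¬(num &&& 2^i = 0) then
        dp.set num (max (dp.getD num 0) (dp.getD (num ^^^ 2^i) 0)) else dp) = sosStep i := by
  funext dp num
  simp only [sosStep, ne_eq]

lemma int_two_pow_sub_one (L : Nat) : ((2^L : Nat) : Int) - 1 = ((2^L - 1 : Nat) : Int) := by
  have : (1:Nat) ≤ 2^L := Nat.one_le_two_pow
  push_cast [this]
  ring

-- ===== VERDICT (by name: the statement is the Claim_ definition above) =====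
theorem maxProduct_spec : Claim_equal_maxProduct := by
  intro nums _ hpre
  obtain ⟨hne, hnn⟩ := hpre
  unfold Spec_maxProduct
  set ns : List Nat := nums.map Int.toNat with hns
  have hcast : ns.map (fun n => ((n : Nat) : Int)) = nums := by
    rw [hns, List.map_map]
    conv_rhs => rw [← List.map_id nums]
    apply List.map_congr_left
    intro x hx
    simp [Int.toNat_of_nonneg (hnn x hx)]
  cases hmx : PySem.List.max? nums (fun x => x) with
  | none => exact absurd ((PySem.List.max?_eq_none_iff nums _).mp hmx) hne
  | some mxm =>
  have hmem := PySem.List.max?_mem hmx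
  have hmax := PySem.List.max?_isMax hmx
  set L := PySem.Int.bitLength mxm with hL
  have hlt : ∀ x ∈ ns, x < 2^L := by
    intro x hx
    rw [hns] at hx
    obtain ⟨y, hy, rfl⟩ := List.mem_map.mp hx
    have h1 := hmax y hy
    have h2 : mxm.natAbs < 2 ^ L := by
      rw [hL]; exact PySem.Int.lt_two_pow_bitLength mxm
    have h3 := hnn y hy
    simp only at h1
    omega
  -- the dp table after initialisation and both SOS loops
  set dpI : List Int := ns.foldl (fun d x => d.set x (x:Int)) (List.replicate (2^L) (0:Int)) with hdpI
  set dpF : List Int := (List.range L).foldl (fun dp i => (List.range (2^L)).foldl (sosStep i) dp) dpI with hdpF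
  have hIlen : dpI.length = 2^L := by rw [hdpI, init_length]; simp
  have hIchar : ∀ m, m < 2^L → dpI.getD m 0 = mu ns 0 m := by
    intro m hm
    rw [hdpI, init_getD ns _ m (by simpa using hlt), mu_zero]
    split
    · rfl
    · simp
  obtain ⟨hFlen, hFchar⟩ := sos_outer ns L L dpI le_rfl hIlen hIchar
  rw [← hdpF] at hFlen hFchar
  -- A's return value
  have hns_ne : ns ≠ [] := by
    rw [hns]; simpa using hne
  cases hr : PySem.List.max? (ns.map (fun x : Nat => (x:Int) * dpF.getD (((2:Nat)^L - 1) ^^^ x) 0)) (fun x => x) with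
  | none =>
    exact absurd (List.map_eq_nil_iff.mp ((PySem.List.max?_eq_none_iff _ _).mp hr)) hns_ne
  | some r =>
  have hA : maxProduct nums = r := by
    simp only [maxProduct, hmx]
    rw [← hL, ← hcast]
    simp only [List.foldl_map, List.map_map, Function.comp_def,
      PySem.List.pyRange_one, Int.sub_zero, Int.toNat_natCast, zero_add,
      int_one_shiftLeft_cast, int_one_shiftLeft, Nat.one_shiftLeft,
      int_two_pow_sub_one, int_pow_sub_one_add_one,
      PySem.Int.band_natCast, PySem.Int.bxor_natCast,
      PySem.List.pySetD_natCast, PySem.List.pyGetD_natCast,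
      ne_eq, Int.natCast_eq_zero]
    simp only [sosStep_eq]
    rw [hr]
  -- abbreviations
  have hSnn : ∀ x : Nat, (0:Int) ≤ bb ns (fun y => y &&& x == 0) 0 := fun x => bb_nonneg _ _
  have hTchar : ∀ x ∈ ns, (x:Int) * dpF.getD ((2^L - 1) ^^^ x) 0
      = (x:Int) * bb ns (fun y => y &&& x == 0) 0 := by
    intro x hx
    rw [hFchar _ (comp_lt L x (hlt x hx)), mu_comp ns L x (hlt x hx) hlt]
  have hr_mem := PySem.List.max?_mem hr
  have hr_max := PySem.List.max?_isMax hr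
  -- A ≤ B
  obtain ⟨x, hx, hTx⟩ := List.mem_map.mp hr_mem
  have hAleB : r ≤ outerB nums nums 0 := by
    rw [← hTx, hTchar x hx]
    rcases bb_cases ns (fun y => y &&& x == 0) 0 with h0 | ⟨y, hy, hpy, hEq⟩
    · rw [h0, mul_zero]
      exact le_outerB nums nums 0
    · rw [hEq]
      have hxy : x &&& y = 0 := by
        rw [Nat.land_comm]; exact beq_iff_eq.mp hpy
      refine pair_le_outerB nums nums ((x:Nat):Int) ((y:Nat):Int) 0 ?_ ?_ ?_
      · rw [← hcast]; exact List.mem_map_of_mem hx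
      · rw [← hcast]; exact List.mem_map_of_mem hy
      · rw [PySem.Int.band_natCast, hxy]; rfl
  -- 0 ≤ r
  have h0r : (0:Int) ≤ r := by
    rw [← hTx, hTchar x hx]
    exact mul_nonneg (by positivity) (hSnn x)
  -- B ≤ A
  have hBleA : outerB nums nums 0 ≤ r := by
    apply outerB_le
    · intro a ha b hb hab
      rw [← hcast] at ha hb
      obtain ⟨u, hu, rfl⟩ := List.mem_map.mp ha
      obtain ⟨v, hv, rfl⟩ := List.mem_map.mp hb
      rw [PySem.Int.band_natCast] at hab
      have huv : u &&& v = 0 := by exact_mod_cast hab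
      have hvle : ((v:Nat):Int) ≤ bb ns (fun y => y &&& u == 0) 0 := by
        apply le_bb_of_mem ns _ 0 v hv
        simp [Nat.land_comm v u, huv]
      calc ((u:Nat):Int) * ((v:Nat):Int)
          ≤ (u:Int) * bb ns (fun y => y &&& u == 0) 0 :=
            mul_le_mul_of_nonneg_left hvle (by positivity)
        _ = (u:Int) * dpF.getD ((2^L - 1) ^^^ u) 0 := (hTchar u hu).symm
        _ ≤ r := hr_max _ (List.mem_map_of_mem hu)
    · exact h0r
  rw [hA, alt_eq]
  exact le_antisymm hAleB hBleA
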